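-- pv_equiv track=rewrite | github.com/j-ble/TradingBot | historyBot/4H/backtest_4h_bias_v3.py | detect_death_spirals
-- ===== SOURCE A (Python) =====
-- def detect_death_spirals(results, threshold=5):
--     spirals = []
--     streak = 0
--     for i, r in enumerate(results):
--         if r['outcome'] == 'WRONG':
--             streak += 1
--         else:
--             if streak >= threshold:
--                 spirals.append(streak)
--             streak = 0
--     if streak >= threshold:
--         spirals.append(streak)
--     return spirals
-- ===== SOURCE B (Python) =====
-- def detect_death_spirals(results, threshold=5):
--     # Positions of non-WRONG rows are separators; each maximal WRONG streak
--     # length is the gap between consecutive separators (with sentinels -1 and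
--     # len(results)) minus one. No streak counter is maintained.
--     bounds = [-1] + [i for i, r in enumerate(results) if r['outcome'] != 'WRONG'] + [len(results)]
--     return [b - a - 1 for a, b in zip(bounds, bounds[1:]) if b - a - 1 >= threshold]
-- ===== Notes on version B (the rewrite author's own statement) =====
-- stated objective: alternative
-- what changed: B drops A's incremental streak counter entirely: it records the index positions of non-WRONG rows, brackets them with sentinels -1 and len(results), and obtains each streak length by subtracting consecutive separator positions (gap minus one), filtering those >= threshold.
import Mathlib
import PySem

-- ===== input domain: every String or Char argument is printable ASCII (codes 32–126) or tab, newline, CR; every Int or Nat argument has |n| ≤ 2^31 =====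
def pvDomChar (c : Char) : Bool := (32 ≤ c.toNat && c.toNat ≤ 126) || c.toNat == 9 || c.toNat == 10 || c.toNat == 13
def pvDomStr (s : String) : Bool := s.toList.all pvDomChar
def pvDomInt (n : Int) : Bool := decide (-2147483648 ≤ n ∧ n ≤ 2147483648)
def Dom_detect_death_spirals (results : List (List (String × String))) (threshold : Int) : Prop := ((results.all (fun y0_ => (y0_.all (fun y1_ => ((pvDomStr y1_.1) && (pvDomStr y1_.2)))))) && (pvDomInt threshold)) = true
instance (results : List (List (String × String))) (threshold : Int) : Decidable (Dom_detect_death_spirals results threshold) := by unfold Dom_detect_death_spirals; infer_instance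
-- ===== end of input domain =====

-- B replaces A's streak counter / flush control flow by a separator-index algorithm:
-- streak lengths are gaps between consecutive non-WRONG positions (with sentinels),
-- computed by subtraction; same cost, exact same values.

-- ===== PORT A =====
-- counter loop: state = (spirals, streak); post-loop flush of the last streak
def detect_death_spirals (results : List (List (String × String))) (threshold : Int) : List Int :=
  let st := results.foldl (fun (st : List Int × Int) r =>
    if (PySem.Dict.getD (PySem.Dict.mk r) "outcome" "") == "WRONG" then (st.1, st.2 + 1)
    else ((if threshold ≤ st.2 then st.1 ++ [st.2] else st.1), 0)) ([], 0)
  if threshold ≤ st.2 then st.1 ++ [st.2] else st.1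

-- ===== PORT B =====
-- separator positions with sentinels; streak length = gap between consecutive bounds - 1
def detect_death_spirals_alt (results : List (List (String × String))) (threshold : Int) : List Int :=
  let bounds : List Int := [(-1 : Int)] ++
    ((PySem.List.enumerate results 0).filter
      (fun p => !((PySem.Dict.getD (PySem.Dict.mk p.2) "outcome" "") == "WRONG"))).map (fun p => p.1)
    ++ [(results.length : Int)]
  ((bounds.zip (bounds.drop 1)).map (fun p => p.2 - p.1 - 1)).filter (fun n => threshold ≤ n)

-- ===== PRECONDITION & SPEC =====
-- Pre_: every row has the key "outcome"; on a row without it Python A raises KeyError.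
def Pre_detect_death_spirals (results : List (List (String × String))) (threshold : Int) : Prop :=
  ∀ r ∈ results, (PySem.Dict.get? (PySem.Dict.mk r) "outcome").isSome
instance (results : List (List (String × String))) (threshold : Int) : Decidable (Pre_detect_death_spirals results threshold) := by unfold Pre_detect_death_spirals; infer_instance
def pvWitness_detect_death_spirals : (List (List (String × String))) × Int :=
  ([[("outcome", "WRONG")], [("outcome", "WRONG")], [("outcome", "WIN")]], 2)

def Spec_detect_death_spirals (results : List (List (String × String))) (threshold : Int) (out : List Int) : Prop := out = detect_death_spirals_alt results threshold
instance (results : List (List (String × String))) (threshold : Int) (out : List Int) : Decidable (Spec_detect_death_spirals results threshold out) := by unfold Spec_detect_death_spirals; infer_instance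

-- ===== CLAIM (what is proved, stated in full; the proofs are below) =====
def Claim_equal_detect_death_spirals : Prop := ∀ (results : List (List (String × String))) (threshold : Int), Dom_detect_death_spirals results threshold → Pre_detect_death_spirals results threshold → Spec_detect_death_spirals results threshold (detect_death_spirals results threshold)

-- ===== LEMMAS AND PROOFS =====

-- Reference semantics: the ordered list of WRONG-run lengths, current run = k.
def ddsRuns (results : List (List (String × String))) (k : Int) : List Int :=
  match results with
  | [] => [k]
  | r :: rest =>
      if (PySem.Dict.getD (PySem.Dict.mk r) "outcome" "") == "WRONG" then ddsRuns rest (k + 1)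
      else k :: ddsRuns rest 0

-- the separator positions of results, indices starting at s
def ddsSeps (results : List (List (String × String))) (s : Int) : List Int :=
  match results with
  | [] => []
  | r :: rest =>
      if (PySem.Dict.getD (PySem.Dict.mk r) "outcome" "") == "WRONG" then ddsSeps rest (s + 1)
      else s :: ddsSeps rest (s + 1)

def ddsDiffs (l : List Int) : List Int := (l.zip (l.drop 1)).map (fun p => p.2 - p.1 - 1)

lemma dds_A_loop (threshold : Int) (results : List (List (String × String)))
    (sp : List Int) (k : Int) :
    (let st := results.foldl (fun (st : List Int × Int) r =>
        if (PySem.Dict.getD (PySem.Dict.mk r) "outcome" "") == "WRONG" then (st.1, st.2 + 1)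
        else ((if threshold ≤ st.2 then st.1 ++ [st.2] else st.1), 0)) (sp, k)
      if threshold ≤ st.2 then st.1 ++ [st.2] else st.1)
    = sp ++ (ddsRuns results k).filter (fun n => threshold ≤ n) := by
  induction results generalizing sp k with
  | nil =>
      simp only [List.foldl_nil, ddsRuns, List.filter]
      split_ifs with h <;> simp [h]
  | cons r rest ih =>
      simp only [List.foldl_cons, ddsRuns]
      by_cases hw : ((PySem.Dict.getD (PySem.Dict.mk r) "outcome" "") == "WRONG") = true
      · simp only [hw, if_true]
        exact ih sp (k + 1)
      · simp only [hw, Bool.false_eq_true, if_false, List.filter]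
        rw [ih]
        split_ifs with h <;> simp [h]

lemma dds_enum_filter (results : List (List (String × String))) (s : Int) :
    ((PySem.List.enumerate results s).filter
      (fun p => !((PySem.Dict.getD (PySem.Dict.mk p.2) "outcome" "") == "WRONG"))).map
        (fun p => p.1)
    = ddsSeps results s := by
  induction results generalizing s with
  | nil => simp [PySem.List.enumerate_nil, ddsSeps]
  | cons r rest ih =>
      simp only [PySem.List.enumerate_cons, List.filter_cons, ddsSeps]
      by_cases hw : ((PySem.Dict.getD (PySem.Dict.mk r) "outcome" "") == "WRONG") = true
      · simp [hw, ih]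
      · simp only [Bool.not_eq_true] at hw
        simp [hw, ih]

lemma dds_diffs_seps (results : List (List (String × String))) (s p : Int) :
    ddsDiffs (p :: ddsSeps results s ++ [s + results.length]) = ddsRuns results (s - p - 1) := by
  induction results generalizing s p with
  | nil => simp [ddsSeps, ddsDiffs, ddsRuns]
  | cons r rest ih =>
      simp only [ddsSeps, ddsRuns]
      by_cases hw : ((PySem.Dict.getD (PySem.Dict.mk r) "outcome" "") == "WRONG") = true
      · simp only [hw, if_true]
        have := ih (s + 1) p
        have hlen : ((s : Int) + 1 + (rest.length : Int)) = s + ((r :: rest).length : Int) := by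
          simp; omega
        rw [hlen] at this
        rw [this]
        congr 1
        omega
      · simp only [hw, Bool.false_eq_true, if_false]
        have := ih (s + 1) s
        have hlen : ((s : Int) + 1 + (rest.length : Int)) = s + ((r :: rest).length : Int) := by
          simp; omega
        rw [hlen] at this
        have hs1 : (s : Int) + 1 - s - 1 = 0 := by omega
        rw [hs1] at this
        simp only [List.cons_append, ddsDiffs] at this ⊢
        simp only [List.zip_cons_cons, List.drop_succ_cons, List.drop_zero, List.map_cons] at this ⊢
        rw [this]

-- ===== VERDICT (by name: the statement is the Claim_ definition above) =====
theorem detect_death_spirals_spec : Claim_equal_detect_death_spirals := by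
  intro results threshold _ _
  show detect_death_spirals results threshold = detect_death_spirals_alt results threshold
  have hA : detect_death_spirals results threshold
      = [] ++ (ddsRuns results 0).filter (fun n => threshold ≤ n) :=
    dds_A_loop threshold results [] 0
  have hB : detect_death_spirals_alt results threshold
      = (ddsRuns results 0).filter (fun n => threshold ≤ n) := by
    show List.filter (fun n => threshold ≤ n)
        (ddsDiffs ([(-1 : Int)] ++ ((PySem.List.enumerate results 0).filter
          (fun p => !((PySem.Dict.getD (PySem.Dict.mk p.2) "outcome" "") == "WRONG"))).map (fun p => p.1)
          ++ [(results.length : Int)])) = _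
    rw [dds_enum_filter results 0]
    have h := dds_diffs_seps results 0 (-1)
    have h1 : ((0 : Int)) + (results.length : Int) = (results.length : Int) := by omega
    have h2 : ((0 : Int)) - (-1) - 1 = 0 := by omega
    rw [h1, h2] at h
    simpa using congrArg (List.filter (fun n => threshold ≤ n)) h
  rw [hA, hB, List.nil_append]
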